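-- pv_equiv track=rewrite | github.com/euwbah/musescore-xen-tuner | tunings/stein/generate-edo-stein.py | get_minimum_req_arrows
-- ===== SOURCE A (Python) =====
-- def get_minimum_req_arrows(edo, fifth_size, num_apotomes):
--     """
--     Gets the minimumal number of up/down arrows so that the entire edo
--     is mapped.
--     num_apotomes refers to the number of flats/sharps in the chain of fifths.
--     """
--     fifth_chain_size = 7 * (num_apotomes * 2 + 1)
--     # note: modulo in python is always positive
--     mapped_steps = list(dict.fromkeys([(x * fifth_size) % edo for x in range(0, fifth_chain_size)]))
--     mapped_steps.sort()
--
--     max_gap = 0 # stores largest gap between two mapped notes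
--     for i in range(0, len(mapped_steps) - 1):
--         gap = mapped_steps[i + 1] - mapped_steps[i]
--         if gap > max_gap:
--             max_gap = gap
--
--     last_gap = mapped_steps[0] + edo - mapped_steps[-1]
--
--     if last_gap > max_gap:
--         max_gap = last_gap
--
--     # if max gap is 1, no arrows needed (every edostep is sequential)
--     # if 2 or 3, 1 arrow needed, (from either direction)
--     # if 4 or 5, 2 arrows needed, etc..
--
--     return max_gap // 2
-- ===== SOURCE B (Python) =====
-- def get_minimum_req_arrows(edo, fifth_size, num_apotomes):
--     fifth_chain_size = 7 * (num_apotomes * 2 + 1)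
--     present = {(x * fifth_size) % edo for x in range(fifth_chain_size)}
--     lo = min(present)
--     hi = max(present)
--     k = len(present)
--     if k == 1:
--         # single mapped step: the whole circle is one gap
--         return edo // 2 if edo > 0 else 0
--     # Pigeonhole buckets (linear-time maximum gap, no sort): the largest gap
--     # between consecutive mapped steps is at least the bucket width, so it
--     # occurs between buckets; only each bucket's min and max are kept.
--     width = (hi - lo + k - 2) // (k - 1)  # = ceil((hi - lo) / (k - 1)) >= 1
--     nb = (hi - lo) // width + 1
--     bmin = [None] * nb
--     bmax = [None] * nb
--     for r in present:
--         i = (r - lo) // width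
--         if bmin[i] is None or r < bmin[i]:
--             bmin[i] = r
--         if bmax[i] is None or r > bmax[i]:
--             bmax[i] = r
--     max_gap = lo + edo - hi  # wrap-around gap
--     prev = lo
--     for i in range(nb):
--         if bmin[i] is not None:
--             if bmin[i] - prev > max_gap:
--                 max_gap = bmin[i] - prev
--             prev = bmax[i]
--     return max_gap // 2
-- ===== Notes on version B (the rewrite author's own statement) =====
-- stated objective: alternative
-- what changed: Replaces dict.fromkeys dedup + built-in sort + index loop with a set of residues and the linear-time pigeonhole maximum-gap technique: per-bucket minima/maxima (bucket width ceil((hi-lo)/(k-1))) and one scan over the buckets, so no sort is performed.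
import Mathlib
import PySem

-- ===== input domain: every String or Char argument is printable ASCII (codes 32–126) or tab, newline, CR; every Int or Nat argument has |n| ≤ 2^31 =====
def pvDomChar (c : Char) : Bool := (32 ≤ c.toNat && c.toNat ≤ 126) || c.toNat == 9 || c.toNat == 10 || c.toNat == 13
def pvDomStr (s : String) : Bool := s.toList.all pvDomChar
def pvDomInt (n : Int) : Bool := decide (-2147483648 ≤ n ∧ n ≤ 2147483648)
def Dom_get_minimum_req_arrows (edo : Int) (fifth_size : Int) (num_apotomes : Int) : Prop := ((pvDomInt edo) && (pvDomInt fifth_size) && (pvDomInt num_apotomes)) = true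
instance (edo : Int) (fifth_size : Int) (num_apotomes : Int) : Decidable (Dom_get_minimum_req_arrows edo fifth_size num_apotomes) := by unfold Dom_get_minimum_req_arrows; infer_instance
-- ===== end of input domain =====

-- B replaces A's dedup + sort + index-loop with a set, per-bucket minima/maxima
-- (the linear-time pigeonhole maximum-gap technique) and one scan over the buckets;
-- no sort is performed ('alternative', no speed claim).

-- ===== PORT A =====
def get_minimum_req_arrows (edo : Int) (fifth_size : Int) (num_apotomes : Int) : Int :=
  let fifth_chain_size := 7 * (num_apotomes * 2 + 1)
  let ms0 := PySem.List.dedup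
    ((PySem.List.pyRange 0 fifth_chain_size 1).map (fun x => PySem.Int.mod (x * fifth_size) edo))
  let mapped_steps := PySem.List.sorted ms0 (fun x => x) false
  let max_gap := (PySem.List.pyRange 0 ((mapped_steps.length : Int) - 1) 1).foldl
      (fun max_gap i =>
        let gap := PySem.List.pyGetD mapped_steps (i + 1) 0 - PySem.List.pyGetD mapped_steps i 0
        if gap > max_gap then gap else max_gap) 0
  let last_gap := PySem.List.pyGetD mapped_steps 0 0 + edo - PySem.List.pyGetD mapped_steps (-1) 0
  let max_gap := if last_gap > max_gap then last_gap else max_gap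
  PySem.Int.floordiv max_gap 2

-- ===== PORT B =====
-- body of B's first loop: bucket index of r, then update bmin[i] / bmax[i]
def pvBucketsStep (lo width : Int) (bm : List (Option Int) × List (Option Int)) (r : Int) :
    List (Option Int) × List (Option Int) :=
  let i := PySem.Int.floordiv (r - lo) width
  let bmin := if (match PySem.List.pyGetD bm.1 i none with
      | none => true
      | some v => r < v) then PySem.List.pySetD bm.1 i (some r) else bm.1
  let bmax := if (match PySem.List.pyGetD bm.2 i none with
      | none => true
      | some v => v < r) then PySem.List.pySetD bm.2 i (some r) else bm.2
  (bmin, bmax)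


-- body of B's second loop: state (max_gap, prev); skip empty buckets
-- the scan step of B (also used by the port)
def pvScanStep (bmin bmax : List (Option Int)) (st : Int × Int) (i : Int) : Int × Int :=
  match PySem.List.pyGetD bmin i none with
  | none => st
  | some mn =>
    ((if mn - st.2 > st.1 then mn - st.2 else st.1),
     -- bmax[i] is filled whenever bmin[i] is (same guard); the default never fires
     (PySem.List.pyGetD bmax i none).getD st.2)


def get_minimum_req_arrows_alt (edo : Int) (fifth_size : Int) (num_apotomes : Int) : Int :=
  let fifth_chain_size := 7 * (num_apotomes * 2 + 1)
  let present := PySem.Set.ofList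
    ((PySem.List.pyRange 0 fifth_chain_size 1).map (fun x => PySem.Int.mod (x * fifth_size) edo))
  let lo := PySem.List.minD present (fun r => r) 0
  let hi := PySem.List.maxD present (fun r => r) 0
  let k := PySem.Set.len present
  if k = 1 then
    if edo > 0 then PySem.Int.floordiv edo 2 else 0
  else
    let width := PySem.Int.floordiv (hi - lo + k - 2) (k - 1)
    let nb := PySem.Int.floordiv (hi - lo) width + 1
    let bs := present.foldl (pvBucketsStep lo width)
      (List.replicate nb.toNat none, List.replicate nb.toNat none)
    let res := (PySem.List.pyRange 0 nb 1).foldl (pvScanStep bs.1 bs.2) (lo + edo - hi, lo)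
    PySem.Int.floordiv res.1 2

-- ===== PRECONDITION & SPEC =====
-- Pre_ excludes exactly the inputs where Python A raises: edo = 0 (ZeroDivisionError in the
-- residue comprehension) and num_apotomes < 0 (empty chain, IndexError on mapped_steps[0]).
def Pre_get_minimum_req_arrows (edo : Int) (fifth_size : Int) (num_apotomes : Int) : Prop :=
  edo ≠ 0 ∧ 0 ≤ num_apotomes
instance (edo : Int) (fifth_size : Int) (num_apotomes : Int) : Decidable (Pre_get_minimum_req_arrows edo fifth_size num_apotomes) := by unfold Pre_get_minimum_req_arrows; infer_instance
def pvWitness_get_minimum_req_arrows : Int × Int × Int := (12, 7, 1)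

def Spec_get_minimum_req_arrows (edo : Int) (fifth_size : Int) (num_apotomes : Int) (out : Int) : Prop := out = get_minimum_req_arrows_alt edo fifth_size num_apotomes
instance (edo : Int) (fifth_size : Int) (num_apotomes : Int) (out : Int) : Decidable (Spec_get_minimum_req_arrows edo fifth_size num_apotomes out) := by unfold Spec_get_minimum_req_arrows; infer_instance

-- ===== CLAIM (what is proved, stated in full; the proofs are below) =====
def Claim_equal_get_minimum_req_arrows : Prop := ∀ (edo : Int) (fifth_size : Int) (num_apotomes : Int), Dom_get_minimum_req_arrows edo fifth_size num_apotomes → Pre_get_minimum_req_arrows edo fifth_size num_apotomes → Spec_get_minimum_req_arrows edo fifth_size num_apotomes (get_minimum_req_arrows edo fifth_size num_apotomes)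

-- ===== LEMMAS AND PROOFS =====
-- proof-side
def pvIdx (lo w r : Int) : Int := PySem.Int.floordiv (r - lo) w
def pvMinStep (o : Option Int) (r : Int) : Option Int :=
  match o with
  | none => some r
  | some v => if r < v then some r else some v
def pvMaxStep (o : Option Int) (r : Int) : Option Int :=
  match o with
  | none => some r
  | some v => if v < r then some r else some v

theorem length_pySetD {α : Type} (xs : List α) (i : Int) (v : α) :
    (PySem.List.pySetD xs i v).length = xs.length := by
  simp only [PySem.List.pySetD, PySem.List.pySet?, PySem.List.pyIdx?]
  split <;> split <;> simp

theorem bucketsStep_get_min (lo w : Int) (bm : List (Option Int)) (r : Int)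
    (h0 : 0 ≤ pvIdx lo w r) (h1 : pvIdx lo w r < bm.length) (i : Nat) :
    PySem.List.pyGetD
        (if (match PySem.List.pyGetD bm (pvIdx lo w r) none with
          | none => true
          | some v => decide (r < v)) = true
         then PySem.List.pySetD bm (pvIdx lo w r) (some r) else bm) (i : Int) none
      = (if (i : Int) = pvIdx lo w r then pvMinStep (PySem.List.pyGetD bm (i : Int) none) r
         else PySem.List.pyGetD bm (i : Int) none) := by
  have hn : pvIdx lo w r = ((pvIdx lo w r).toNat : Int) := by omega
  have hlt : (pvIdx lo w r).toNat < bm.length := by omega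
  rcases hv : PySem.List.pyGetD bm (pvIdx lo w r) none with _ | v
  · simp only [hv]
    rw [if_pos trivial]
    rw [hn, PySem.List.pyGetD_pySetD_natCast bm _ i (some r) none hlt]
    by_cases hi : i = (pvIdx lo w r).toNat
    · subst hi
      rw [← hn]
      simp [hv, pvMinStep]
    · have hi' : ¬ (i : Int) = ((pvIdx lo w r).toNat : Int) := by omega
      rw [← hn] at hi'
      simp [hi, hi']
      intro hfalse; exfalso; omega
  · simp only [hv]
    by_cases hr : r < v
    · simp only [hr, decide_true]
      rw [if_pos trivial]
      rw [hn, PySem.List.pyGetD_pySetD_natCast bm _ i (some r) none hlt]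
      by_cases hi : i = (pvIdx lo w r).toNat
      · subst hi
        rw [← hn]
        simp [hv, pvMinStep, hr]
      · have hi' : ¬ (i : Int) = ((pvIdx lo w r).toNat : Int) := by omega
        rw [← hn] at hi'
        simp [hi, hi']
        intro hfalse; exfalso; omega
    · simp only [hr, decide_false]
      rw [if_neg (by simp)]
      by_cases hi : (i : Int) = pvIdx lo w r
      · rw [hi, hv]
        simp [pvMinStep, hr, hv]
      · simp [hi]

theorem bucketsStep_get_max (lo w : Int) (bm : List (Option Int)) (r : Int)
    (h0 : 0 ≤ pvIdx lo w r) (h1 : pvIdx lo w r < bm.length) (i : Nat) :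
    PySem.List.pyGetD
        (if (match PySem.List.pyGetD bm (pvIdx lo w r) none with
          | none => true
          | some v => decide (v < r)) = true
         then PySem.List.pySetD bm (pvIdx lo w r) (some r) else bm) (i : Int) none
      = (if (i : Int) = pvIdx lo w r then pvMaxStep (PySem.List.pyGetD bm (i : Int) none) r
         else PySem.List.pyGetD bm (i : Int) none) := by
  have hn : pvIdx lo w r = ((pvIdx lo w r).toNat : Int) := by omega
  have hlt : (pvIdx lo w r).toNat < bm.length := by omega
  rcases hv : PySem.List.pyGetD bm (pvIdx lo w r) none with _ | v
  · simp only [hv]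
    rw [if_pos trivial]
    rw [hn, PySem.List.pyGetD_pySetD_natCast bm _ i (some r) none hlt]
    by_cases hi : i = (pvIdx lo w r).toNat
    · subst hi
      rw [← hn]
      simp [hv, pvMaxStep]
    · have hi' : ¬ (i : Int) = ((pvIdx lo w r).toNat : Int) := by omega
      rw [← hn] at hi'
      simp [hi, hi']
      intro hfalse; exfalso; omega
  · simp only [hv]
    by_cases hr : v < r
    · simp only [hr, decide_true]
      rw [if_pos trivial]
      rw [hn, PySem.List.pyGetD_pySetD_natCast bm _ i (some r) none hlt]
      by_cases hi : i = (pvIdx lo w r).toNat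
      · subst hi
        rw [← hn]
        simp [hv, pvMaxStep, hr]
      · have hi' : ¬ (i : Int) = ((pvIdx lo w r).toNat : Int) := by omega
        rw [← hn] at hi'
        simp [hi, hi']
        intro hfalse; exfalso; omega
    · simp only [hr, decide_false]
      rw [if_neg (by simp)]
      by_cases hi : (i : Int) = pvIdx lo w r
      · rw [hi, hv]
        simp [pvMaxStep, hr, hv]
      · simp [hi]

theorem buckets_fold (lo w : Int) (rest : List Int) :
    ∀ (bm bx : List (Option Int)),
    (∀ r ∈ rest, 0 ≤ pvIdx lo w r ∧ pvIdx lo w r < bm.length ∧ pvIdx lo w r < bx.length) →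
    (rest.foldl (pvBucketsStep lo w) (bm, bx)).1.length = bm.length ∧
    (rest.foldl (pvBucketsStep lo w) (bm, bx)).2.length = bx.length ∧
    (∀ i : Nat,
      PySem.List.pyGetD (rest.foldl (pvBucketsStep lo w) (bm, bx)).1 (i : Int) none
        = (rest.filter (fun r => pvIdx lo w r = (i : Int))).foldl pvMinStep
            (PySem.List.pyGetD bm (i : Int) none) ∧
      PySem.List.pyGetD (rest.foldl (pvBucketsStep lo w) (bm, bx)).2 (i : Int) none
        = (rest.filter (fun r => pvIdx lo w r = (i : Int))).foldl pvMaxStep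
            (PySem.List.pyGetD bx (i : Int) none)) := by
  induction rest with
  | nil => intro bm bx _; exact ⟨rfl, rfl, fun i => ⟨rfl, rfl⟩⟩
  | cons r rest ih =>
    intro bm bx hrange
    obtain ⟨h0, h1, h2⟩ := hrange r (List.mem_cons_self)
    rw [List.foldl_cons]
    have hshape : pvBucketsStep lo w (bm, bx) r =
        ((if (match PySem.List.pyGetD bm (pvIdx lo w r) none with
            | none => true
            | some v => decide (r < v)) = true
          then PySem.List.pySetD bm (pvIdx lo w r) (some r) else bm),
         (if (match PySem.List.pyGetD bx (pvIdx lo w r) none with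
            | none => true
            | some v => decide (v < r)) = true
          then PySem.List.pySetD bx (pvIdx lo w r) (some r) else bx)) := by
      simp [pvBucketsStep, pvIdx]
    have hl1 : (pvBucketsStep lo w (bm, bx) r).1.length = bm.length := by
      rw [hshape]; dsimp only; (repeat' split) <;> simp [length_pySetD]
    have hl2 : (pvBucketsStep lo w (bm, bx) r).2.length = bx.length := by
      rw [hshape]; dsimp only; (repeat' split) <;> simp [length_pySetD]
    have hget1 : ∀ i : Nat, PySem.List.pyGetD (pvBucketsStep lo w (bm, bx) r).1 (i : Int) none
        = (if (i : Int) = pvIdx lo w r then pvMinStep (PySem.List.pyGetD bm (i : Int) none) r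
           else PySem.List.pyGetD bm (i : Int) none) := by
      intro i; rw [hshape]; exact bucketsStep_get_min lo w bm r h0 h1 i
    have hget2 : ∀ i : Nat, PySem.List.pyGetD (pvBucketsStep lo w (bm, bx) r).2 (i : Int) none
        = (if (i : Int) = pvIdx lo w r then pvMaxStep (PySem.List.pyGetD bx (i : Int) none) r
           else PySem.List.pyGetD bx (i : Int) none) := by
      intro i; rw [hshape]; exact bucketsStep_get_max lo w bx r h0 h2 i
    have hrest : ∀ s ∈ rest, 0 ≤ pvIdx lo w s ∧
        pvIdx lo w s < (pvBucketsStep lo w (bm, bx) r).1.length ∧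
        pvIdx lo w s < (pvBucketsStep lo w (bm, bx) r).2.length := by
      intro s hs
      obtain ⟨a, b, c⟩ := hrange s (List.mem_cons_of_mem _ hs)
      rw [hl1, hl2]; exact ⟨a, b, c⟩
    obtain ⟨ihl1, ihl2, ihget⟩ := ih (pvBucketsStep lo w (bm, bx) r).1 (pvBucketsStep lo w (bm, bx) r).2 hrest
    refine ⟨by rw [ihl1, hl1], by rw [ihl2, hl2], ?_⟩
    intro i
    obtain ⟨ig1, ig2⟩ := ihget i
    rw [List.filter_cons]
    by_cases hi : pvIdx lo w r = (i : Int)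
    · have hcond : (decide (pvIdx lo w r = (i : Int))) = true := by simp [hi]
      rw [if_pos hcond]
      constructor
      · rw [ig1, hget1 i, if_pos hi.symm, List.foldl_cons]
      · rw [ig2, hget2 i, if_pos hi.symm, List.foldl_cons]
    · have hcond : ¬ (decide (pvIdx lo w r = (i : Int))) = true := by simp [hi]
      rw [if_neg hcond]
      constructor
      · rw [ig1, hget1 i, if_neg (fun hh => hi hh.symm)]
      · rw [ig2, hget2 i, if_neg (fun hh => hi hh.symm)]

theorem minStep_fold_some (l : List Int) : ∀ v : Int,
    ∃ m, l.foldl pvMinStep (some v) = some m ∧ (m = v ∨ m ∈ l) ∧ m ≤ v ∧ ∀ x ∈ l, m ≤ x := by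
  induction l with
  | nil => intro v; exact ⟨v, rfl, Or.inl rfl, le_refl v, by simp⟩
  | cons r t ih =>
    intro v
    by_cases h : r < v
    · obtain ⟨m, hm, hmem, hle, hall⟩ := ih r
      refine ⟨m, ?_, ?_, by omega, ?_⟩
      · simpa [pvMinStep, h] using hm
      · rcases hmem with rfl | hm2
        · exact Or.inr (List.mem_cons_self)
        · exact Or.inr (List.mem_cons_of_mem _ hm2)
      · intro x hx
        rcases List.mem_cons.mp hx with rfl | hx
        · omega
        · exact hall x hx
    · obtain ⟨m, hm, hmem, hle, hall⟩ := ih v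
      refine ⟨m, ?_, ?_, hle, ?_⟩
      · simpa [pvMinStep, h] using hm
      · rcases hmem with rfl | hm2
        · exact Or.inl rfl
        · exact Or.inr (List.mem_cons_of_mem _ hm2)
      · intro x hx
        rcases List.mem_cons.mp hx with rfl | hx
        · omega
        · exact hall x hx

theorem minO_spec (l : List Int) (hl : l ≠ []) :
    ∃ m, l.foldl pvMinStep none = some m ∧ m ∈ l ∧ ∀ x ∈ l, m ≤ x := by
  match l, hl with
  | r :: t, _ =>
    obtain ⟨m, hm, hmem, hle, hall⟩ := minStep_fold_some t r
    refine ⟨m, by simpa [pvMinStep] using hm, ?_, ?_⟩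
    · rcases hmem with rfl | h
      · exact List.mem_cons_self
      · exact List.mem_cons_of_mem _ h
    · intro x hx
      rcases List.mem_cons.mp hx with rfl | hx
      · exact hle
      · exact hall x hx

theorem maxStep_fold_some (l : List Int) : ∀ v : Int,
    ∃ m, l.foldl pvMaxStep (some v) = some m ∧ (m = v ∨ m ∈ l) ∧ v ≤ m ∧ ∀ x ∈ l, x ≤ m := by
  induction l with
  | nil => intro v; exact ⟨v, rfl, Or.inl rfl, le_refl v, by simp⟩
  | cons r t ih =>
    intro v
    by_cases h : v < r
    · obtain ⟨m, hm, hmem, hle, hall⟩ := ih r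
      refine ⟨m, ?_, ?_, by omega, ?_⟩
      · simpa [pvMaxStep, h] using hm
      · rcases hmem with rfl | hm2
        · exact Or.inr (List.mem_cons_self)
        · exact Or.inr (List.mem_cons_of_mem _ hm2)
      · intro x hx
        rcases List.mem_cons.mp hx with rfl | hx
        · omega
        · exact hall x hx
    · obtain ⟨m, hm, hmem, hle, hall⟩ := ih v
      refine ⟨m, ?_, ?_, hle, ?_⟩
      · simpa [pvMaxStep, h] using hm
      · rcases hmem with rfl | hm2
        · exact Or.inl rfl
        · exact Or.inr (List.mem_cons_of_mem _ hm2)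
      · intro x hx
        rcases List.mem_cons.mp hx with rfl | hx
        · omega
        · exact hall x hx

theorem maxO_spec (l : List Int) (hl : l ≠ []) :
    ∃ m, l.foldl pvMaxStep none = some m ∧ m ∈ l ∧ ∀ x ∈ l, x ≤ m := by
  match l, hl with
  | r :: t, _ =>
    obtain ⟨m, hm, hmem, hle, hall⟩ := maxStep_fold_some t r
    refine ⟨m, by simpa [pvMaxStep] using hm, ?_, ?_⟩
    · rcases hmem with rfl | h
      · exact List.mem_cons_self
      · exact List.mem_cons_of_mem _ h
    · intro x hx
      rcases List.mem_cons.mp hx with rfl | hx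
      · exact hle
      · exact hall x hx

def pvGaps (S : List Int) : List Int := (S.zip S.tail).map (fun p => p.2 - p.1)
def pvGmax (S : List Int) : Int :=
  (S.zip S.tail).foldl (fun mg p => if p.2 - p.1 > mg then p.2 - p.1 else mg) 0

theorem pvGmax_eq_foldl_max (S : List Int) : pvGmax S = (pvGaps S).foldl max 0 := by
  rw [pvGmax, pvGaps, List.foldl_map]
  apply PySem.List.foldl_congr_mem
  intro acc p _
  by_cases h : p.2 - p.1 > acc <;> simp [h] <;> omega

theorem le_foldl_max_init (l : List Int) : ∀ c : Int, c ≤ l.foldl max c := by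
  induction l with
  | nil => intro c; exact le_refl c
  | cons x t ih => intro c; exact le_trans (le_max_left c x) (ih _)

theorem le_foldl_max_mem (l : List Int) : ∀ (c x : Int), x ∈ l → x ≤ l.foldl max c := by
  induction l with
  | nil => intro c x hx; simp at hx
  | cons y t ih =>
    intro c x hx
    rcases List.mem_cons.mp hx with rfl | hx
    · exact le_trans (le_max_right c x) (le_foldl_max_init t _)
    · exact ih _ x hx

theorem foldl_max_mem_or (l : List Int) : ∀ c : Int, l.foldl max c = c ∨ l.foldl max c ∈ l := by
  induction l with
  | nil => intro c; exact Or.inl rfl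
  | cons y t ih =>
    intro c
    rcases ih (max c y) with h | h
    · rw [List.foldl_cons, h]
      rcases max_choice c y with h2 | h2 <;> rw [h2]
      · exact Or.inl rfl
      · exact Or.inr List.mem_cons_self
    · exact Or.inr (List.mem_cons_of_mem _ h)

theorem pvGaps_getElem (S : List Int) (j : Nat) (h : j < (pvGaps S).length) :
    (pvGaps S)[j] = S[j + 1]'(by simp [pvGaps] at h; omega) - S[j]'(by simp [pvGaps] at h; omega) := by
  simp [pvGaps, List.getElem_zip, List.getElem_tail]

theorem pvGaps_sum (S : List Int) (a : Int) (ha : S ≠ []) (hhead : S.head ha = a) :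
    (pvGaps S).sum = S.getLast ha - a := by
  induction S generalizing a with
  | nil => simp at ha
  | cons x t ih =>
    rcases t with _ | ⟨y, t'⟩
    · simp [pvGaps] at *; omega
    · have := ih (a := y) (by simp) rfl
      have hx : x = a := by simpa using hhead
      have hgaps : pvGaps (x :: y :: t') = (y - x) :: pvGaps (y :: t') := by
        simp [pvGaps]
      have hlast : (x :: y :: t').getLast ha = (y :: t').getLast (by simp) :=
        List.getLast_cons (by simp)
      rw [hgaps, List.sum_cons, this, hlast]
      omega

-- a strictly sorted list: elements are strictly monotone in the index
theorem sorted_getElem_lt (S : List Int) (hS : S.Pairwise (· < ·)) (i j : Nat)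
    (hij : i < j) (hj : j < S.length) : S[i]'(by omega) < S[j] :=
  List.pairwise_iff_getElem.mp hS i j (by omega) hj hij

-- an adjacent pair (nothing of S strictly between) is a consecutive pair, so its gap is a gap
theorem adjacent_gap_mem (S : List Int) (hS : S.Pairwise (· < ·)) (a b : Int)
    (ha : a ∈ S) (hb : b ∈ S) (hab : a < b)
    (hadj : ∀ c ∈ S, ¬(a < c ∧ c < b)) : b - a ∈ pvGaps S := by
  obtain ⟨ia, hia, rfl⟩ := List.getElem_of_mem ha
  obtain ⟨ib, hib, rfl⟩ := List.getElem_of_mem hb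
  have hlt : ia < ib := by
    by_contra h
    rcases Nat.lt_or_ge ib ia with h2 | h2
    · exact absurd (sorted_getElem_lt S hS ib ia h2 hia) (by omega)
    · have : ia = ib := by omega
      subst this; omega
  have hsucc : ib = ia + 1 := by
    by_contra h
    have h2 : ia + 1 < ib := by omega
    have c1 : S[ia] < S[ia + 1]'(by omega) := sorted_getElem_lt S hS ia (ia + 1) (by omega) (by omega)
    have c2 : S[ia + 1]'(by omega) < S[ib] := sorted_getElem_lt S hS (ia + 1) ib h2 hib
    exact hadj (S[ia + 1]'(by omega)) (List.getElem_mem _) ⟨c1, c2⟩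
  subst hsucc
  have hlen : ia < (pvGaps S).length := by
    simp [pvGaps]; omega
  have := pvGaps_getElem S ia hlen
  rw [← this]
  exact List.getElem_mem _

theorem pvGmax_mem (S : List Int) (hS : S.Pairwise (· < ·)) (hk : 2 ≤ S.length) :
    pvGmax S ∈ pvGaps S := by
  have hne : pvGaps S ≠ [] := by
    have : (pvGaps S).length ≠ 0 := by simp [pvGaps]; omega
    exact fun h => this (by rw [h]; rfl)
  have hpos : ∀ x ∈ pvGaps S, 0 < x := by
    intro x hx
    obtain ⟨j, hj, rfl⟩ := List.getElem_of_mem hx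
    rw [pvGaps_getElem S j hj]
    have := sorted_getElem_lt S hS j (j + 1) (by omega) (by simp [pvGaps] at hj; omega)
    omega
  rw [pvGmax_eq_foldl_max]
  rcases foldl_max_mem_or (pvGaps S) 0 with h | h
  · exfalso
    match hg : pvGaps S, hne with
    | g :: t, _ =>
      have h1 : g ≤ (pvGaps S).foldl max 0 := le_foldl_max_mem _ 0 g (by rw [hg]; exact List.mem_cons_self)
      have h2 : 0 < g := hpos g (by rw [hg]; exact List.mem_cons_self)
      rw [hg] at h
      rw [hg] at h1
      omega
  · exact h

theorem scan_mono (bmin bmax : List (Option Int)) (l : List Int) :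
    ∀ st : Int × Int, st.1 ≤ (l.foldl (pvScanStep bmin bmax) st).1 := by
  induction l with
  | nil => intro st; exact le_refl _
  | cons i t ih =>
    intro st
    refine le_trans ?_ (ih (pvScanStep bmin bmax st i))
    rw [pvScanStep]
    rcases PySem.List.pyGetD bmin i none with _ | mn
    · exact le_refl _
    · dsimp only
      by_cases h : mn - st.2 > st.1 <;> simp [h] <;> omega

theorem bucket_scan_main (P S : List Int) (edo lo hi w nb : Int)
    (hS : S.Pairwise (· < ·)) (hmem : ∀ x : Int, x ∈ P ↔ x ∈ S) (hk : 2 ≤ S.length)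
    (hw : 0 < w) (hnb1 : 1 ≤ nb)
    (hlo : lo ∈ P) (hlomin : ∀ x ∈ P, lo ≤ x)
    (hhi : hi ∈ P) (hhimax : ∀ x ∈ P, x ≤ hi)
    (hidx : ∀ r ∈ P, 0 ≤ pvIdx lo w r ∧ pvIdx lo w r < nb)
    (hgw : w ≤ pvGmax S) :
    ((PySem.List.pyRange 0 nb 1).foldl
        (pvScanStep
          (P.foldl (pvBucketsStep lo w)
            (List.replicate nb.toNat none, List.replicate nb.toNat none)).1
          (P.foldl (pvBucketsStep lo w)
            (List.replicate nb.toNat none, List.replicate nb.toNat none)).2)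
        (lo + edo - hi, lo)).1 = max (pvGmax S) (lo + edo - hi) := by
  set wrap := lo + edo - hi with hwrap
  set bs := P.foldl (pvBucketsStep lo w)
      (List.replicate nb.toNat none, List.replicate nb.toNat none) with hbs
  -- bucket characterization
  have hrange : ∀ r ∈ P, 0 ≤ pvIdx lo w r ∧
      pvIdx lo w r < ((List.replicate nb.toNat (none : Option Int)).length : Int) ∧
      pvIdx lo w r < ((List.replicate nb.toNat (none : Option Int)).length : Int) := by
    intro r hr
    obtain ⟨a, b⟩ := hidx r hr
    have : ((List.replicate nb.toNat (none : Option Int)).length : Int) = nb := by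
      simp; omega
    rw [this]
    exact ⟨a, b, b⟩
  obtain ⟨hlen1, hlen2, hchar⟩ := buckets_fold lo w P
    (List.replicate nb.toNat none) (List.replicate nb.toNat none) hrange
  have hrep : ∀ i : Nat, PySem.List.pyGetD (List.replicate nb.toNat (none : Option Int)) (i : Int) none = none := by
    intro i
    rw [PySem.List.pyGetD_natCast]
    rcases Nat.lt_or_ge i nb.toNat with h | h
    · rw [List.getD, List.getElem?_replicate, if_pos h]; rfl
    · rw [List.getD, List.getElem?_eq_none (by simpa using h)]; rfl
  have hminchar : ∀ i : Nat, PySem.List.pyGetD bs.1 (i : Int) none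
      = (P.filter (fun r => pvIdx lo w r = (i : Int))).foldl pvMinStep none := by
    intro i; have h := (hchar i).1; rw [hrep i] at h; exact h
  have hmaxchar : ∀ i : Nat, PySem.List.pyGetD bs.2 (i : Int) none
      = (P.filter (fun r => pvIdx lo w r = (i : Int))).foldl pvMaxStep none := by
    intro i; have h := (hchar i).2; rw [hrep i] at h; exact h
  -- index arithmetic
  have idx_mono : ∀ r s : Int, r ≤ s → pvIdx lo w r ≤ pvIdx lo w s := by
    intro r s h
    unfold pvIdx
    simp only [PySem.Int.floordiv_eq_ediv_of_pos hw]
    exact Int.ediv_le_ediv hw (by omega)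
  have idx_gap : ∀ r s : Int, r + w ≤ s → pvIdx lo w r < pvIdx lo w s := by
    intro r s h
    unfold pvIdx
    simp only [PySem.Int.floordiv_eq_ediv_of_pos hw]
    have h1 : (r - lo + 1 * w) / w = (r - lo) / w + 1 := by
      rw [Int.add_mul_ediv_right _ 1 (by omega)]
    have h2 : (r - lo + 1 * w) / w ≤ (s - lo) / w := Int.ediv_le_ediv hw (by omega)
    omega
  have idx_lt : ∀ r s : Int, pvIdx lo w r < pvIdx lo w s → r < s := by
    intro r s h
    by_contra h2
    exact absurd (idx_mono s r (by omega)) (by omega)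
  have hidxlo : pvIdx lo w lo = 0 := by
    unfold pvIdx
    rw [PySem.Int.floordiv_eq_ediv_of_pos hw]
    simp
  -- candidate bound: an adjacent-pair gap in P is one of S's consecutive gaps
  have cand_le : ∀ prev m : Int, prev ∈ P → m ∈ P → prev < m →
      (∀ c ∈ P, ¬(prev < c ∧ c < m)) → m - prev ≤ pvGmax S := by
    intro prev m hp hm hlt hadj
    have hmemgap : m - prev ∈ pvGaps S := by
      apply adjacent_gap_mem S hS prev m ((hmem prev).mp hp) ((hmem m).mp hm) hlt
      intro c hc
      exact hadj c ((hmem c).mpr hc)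
    rw [pvGmax_eq_foldl_max]
    exact le_foldl_max_mem _ 0 _ hmemgap
  have hgmax0 : 0 ≤ pvGmax S := by
    rw [pvGmax_eq_foldl_max]; exact le_foldl_max_init _ 0
  -- the invariant
  have inv : ∀ n : Nat, (1 + n : Int) ≤ nb →
      let st := (PySem.List.pyRange 0 (1 + n) 1).foldl (pvScanStep bs.1 bs.2) (wrap, lo)
      (st.2 ∈ P ∧ pvIdx lo w st.2 < 1 + n ∧ (∀ r ∈ P, pvIdx lo w r < 1 + n → r ≤ st.2)) ∧
      wrap ≤ st.1 ∧ st.1 ≤ max (pvGmax S) wrap := by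
    intro n
    induction n with
    | zero =>
      intro hle st
      have hr01 : PySem.List.pyRange 0 (1 + ((0 : Nat) : Int)) 1 = [0] := by
        norm_num
        decide
      have hB0 : lo ∈ P.filter (fun r => pvIdx lo w r = ((0 : Nat) : Int)) := by
        simp only [List.mem_filter]
        exact ⟨hlo, by simp [hidxlo]⟩
      have hne : P.filter (fun r => pvIdx lo w r = ((0 : Nat) : Int)) ≠ [] :=
        fun h => by rw [h] at hB0; simp at hB0
      obtain ⟨mn, hmn, hmnmem, hmnmin⟩ := minO_spec _ hne
      obtain ⟨mx, hmx, hmxmem, hmxmax⟩ := maxO_spec _ hne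
      have hmn_lo : mn = lo := by
        have h1 := hmnmin lo hB0
        have h2 := hlomin mn (List.mem_of_mem_filter hmnmem)
        omega
      have hstep : pvScanStep bs.1 bs.2 (wrap, lo) 0 = (if (0 : Int) > wrap then 0 else wrap, mx) := by
        rw [pvScanStep]
        have h0 : ((0 : Nat) : Int) = (0 : Int) := rfl
        rw [← h0, hminchar 0, hmaxchar 0, hmn, hmx, hmn_lo]
        simp
      have hst : st = (if (0 : Int) > wrap then 0 else wrap, mx) := by
        show (PySem.List.pyRange 0 (1 + ((0 : Nat) : Int)) 1).foldl (pvScanStep bs.1 bs.2) (wrap, lo)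
            = (if (0 : Int) > wrap then 0 else wrap, mx)
        rw [hr01, List.foldl_cons, List.foldl_nil, hstep]
      rw [hst]
      have hmxidx : pvIdx lo w mx = 0 := by
        have := (List.mem_filter.mp hmxmem).2
        simpa using this
      refine ⟨⟨List.mem_of_mem_filter hmxmem, by rw [hmxidx]; norm_num, ?_⟩, ?_, ?_⟩
      · intro r hr hridx
        have h0 : 0 ≤ pvIdx lo w r := (hidx r hr).1
        have : pvIdx lo w r = ((0 : Nat) : Int) := by push_cast at hridx ⊢; omega
        exact hmxmax r (List.mem_filter.mpr ⟨hr, by simp [this]⟩)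
      · dsimp only
        split <;> omega
      · dsimp only
        split
        · exact le_trans hgmax0 (le_max_left _ _)
        · exact le_max_right _ _
    | succ n ih =>
      intro hle
      have hle' : (1 + (n : Int)) ≤ nb := by push_cast at hle ⊢; omega
      obtain ⟨⟨hprevP, hprevidx, hprevmax⟩, hwraple, hmgle⟩ := ih hle'
      set stp := (PySem.List.pyRange 0 (1 + (n : Int)) 1).foldl (pvScanStep bs.1 bs.2) (wrap, lo) with hstp
      intro st
      have hsplit : PySem.List.pyRange 0 (1 + ((n + 1 : Nat) : Int)) 1
          = PySem.List.pyRange 0 (1 + (n : Int)) 1 ++ [(1 + (n : Int))] := by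
        have heq : (1 + ((n + 1 : Nat) : Int)) = (1 + (n : Int)) + 1 := by push_cast; ring
        rw [heq, PySem.List.pyRange_one_succ_right (a := 0) (b := 1 + (n : Int)) (by omega)]
      have hst : st = pvScanStep bs.1 bs.2 stp (1 + (n : Int)) := by
        show (PySem.List.pyRange 0 (1 + ((n + 1 : Nat) : Int)) 1).foldl (pvScanStep bs.1 bs.2) (wrap, lo)
            = pvScanStep bs.1 bs.2 stp (1 + (n : Int))
        rw [hsplit, List.foldl_append, List.foldl_cons, List.foldl_nil]
      have hjn : ((n + 1 : Nat) : Int) = 1 + (n : Int) := by push_cast; ring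
      rcases hBj : P.filter (fun r => pvIdx lo w r = ((n + 1 : Nat) : Int)) with _ | ⟨q, qs⟩
      · -- bucket 1+n is empty: the state is unchanged
        have hnone : PySem.List.pyGetD bs.1 ((n + 1 : Nat) : Int) none = none := by
          rw [hminchar (n + 1), hBj]; rfl
        have hstep : pvScanStep bs.1 bs.2 stp (1 + (n : Int)) = stp := by
          rw [pvScanStep, ← hjn, hnone]
        rw [hst, hstep]
        refine ⟨⟨hprevP, by omega, ?_⟩, hwraple, hmgle⟩
        intro r hr hridx
        by_cases hcase : pvIdx lo w r < 1 + (n : Int)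
        · exact hprevmax r hr hcase
        · exfalso
          have : pvIdx lo w r = ((n + 1 : Nat) : Int) := by push_cast at hridx hcase ⊢; omega
          have : r ∈ P.filter (fun r => pvIdx lo w r = ((n + 1 : Nat) : Int)) :=
            List.mem_filter.mpr ⟨hr, by simp [this]⟩
          rw [hBj] at this
          simp at this
      · -- bucket 1+n is nonempty
        have hne : P.filter (fun r => pvIdx lo w r = ((n + 1 : Nat) : Int)) ≠ [] := by
          rw [hBj]; simp
        obtain ⟨mn, hmn, hmnmem, hmnmin⟩ := minO_spec _ hne
        obtain ⟨mx, hmx, hmxmem, hmxmax⟩ := maxO_spec _ hne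
        have hmnP : mn ∈ P := List.mem_of_mem_filter hmnmem
        have hmxP : mx ∈ P := List.mem_of_mem_filter hmxmem
        have hmnidx : pvIdx lo w mn = 1 + (n : Int) := by
          have := (List.mem_filter.mp hmnmem).2
          rw [← hjn]; simpa using this
        have hmxidx : pvIdx lo w mx = 1 + (n : Int) := by
          have := (List.mem_filter.mp hmxmem).2
          rw [← hjn]; simpa using this
        have hprevlt : stp.2 < mn := by
          apply idx_lt
          omega
        have hadj : ∀ c ∈ P, ¬(stp.2 < c ∧ c < mn) := by
          rintro c hc ⟨hc1, hc2⟩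
          have hlt2 : pvIdx lo w c ≤ pvIdx lo w mn := idx_mono c mn (by omega)
          by_cases hsm : pvIdx lo w c < 1 + (n : Int)
          · exact absurd (hprevmax c hc hsm) (by omega)
          · have : pvIdx lo w c = ((n + 1 : Nat) : Int) := by
              rw [hmnidx] at hlt2; push_cast at hsm ⊢; omega
            have hcB : c ∈ P.filter (fun r => pvIdx lo w r = ((n + 1 : Nat) : Int)) :=
              List.mem_filter.mpr ⟨hc, by simp [this]⟩
            exact absurd (hmnmin c hcB) (by omega)
        have hcand : mn - stp.2 ≤ pvGmax S := cand_le stp.2 mn hprevP hmnP hprevlt hadj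
        have hstep : pvScanStep bs.1 bs.2 stp (1 + (n : Int))
            = ((if mn - stp.2 > stp.1 then mn - stp.2 else stp.1), mx) := by
          rw [pvScanStep, ← hjn, hminchar (n + 1), hmn, hmaxchar (n + 1), hmx]
          rfl
        rw [hst, hstep]
        have hmnlemx : mn ≤ mx := hmxmax mn hmnmem
        refine ⟨⟨hmxP, by rw [hmxidx]; push_cast; omega, ?_⟩, ?_, ?_⟩
        · intro r hr hridx
          by_cases hcase : pvIdx lo w r < 1 + (n : Int)
          · have := hprevmax r hr hcase
            omega
          · have : pvIdx lo w r = ((n + 1 : Nat) : Int) := by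
              push_cast at hridx hcase ⊢; omega
            exact hmxmax r (List.mem_filter.mpr ⟨hr, by simp [this]⟩)
        · dsimp only
          split <;> omega
        · dsimp only
          split
          · omega
          · exact hmgle
  -- instantiate the invariant at nb
  have hnbcast : (1 + ((nb - 1).toNat : Int)) = nb := by omega
  obtain ⟨⟨hfinP, hfinidx, hfinmax⟩, hfinwrap, hfinle⟩ := inv (nb - 1).toNat (by omega)
  rw [hnbcast] at hfinP hfinidx hfinmax hfinwrap hfinle
  set fin := (PySem.List.pyRange 0 nb 1).foldl (pvScanStep bs.1 bs.2) (wrap, lo) with hfin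
  -- the maximal gap is attained by a consecutive pair (a, b) of S; the scan sees it
  obtain ⟨jdx, hjdx, hjval⟩ := List.getElem_of_mem (pvGmax_mem S hS hk)
  have hjlen : jdx + 1 < S.length := by simp [pvGaps] at hjdx; omega
  set a := S[jdx]'(by omega) with hadef
  set b := S[jdx + 1]'(by omega) with hbdef
  have hgab : pvGmax S = b - a := by rw [← hjval, pvGaps_getElem S jdx hjdx]
  have haS : a ∈ S := List.getElem_mem _
  have hbS : b ∈ S := List.getElem_mem _
  have haP : a ∈ P := (hmem a).mpr haS
  have hbP : b ∈ P := (hmem b).mpr hbS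
  have hab : a < b := sorted_getElem_lt S hS jdx (jdx + 1) (by omega) (by omega)
  have habadj : ∀ c ∈ P, ¬(a < c ∧ c < b) := by
    rintro c hc ⟨h1, h2⟩
    obtain ⟨t, ht, rfl⟩ := List.getElem_of_mem ((hmem c).mp hc)
    rcases Nat.lt_or_ge t (jdx + 1) with hcase | hcase
    · rcases Nat.lt_or_ge t jdx with hc2 | hc2
      · exact absurd (sorted_getElem_lt S hS t jdx hc2 (by omega)) (by omega)
      · have : t = jdx := by omega
        subst this; omega
    · rcases Nat.lt_or_ge (jdx + 1) t with hc2 | hc2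
      · exact absurd (sorted_getElem_lt S hS (jdx + 1) t hc2 (by omega)) (by omega)
      · have : t = jdx + 1 := by omega
        subst this; omega
  set jb := pvIdx lo w b with hjbdef
  have hjba : pvIdx lo w a < jb := idx_gap a b (by omega)
  have hjb1 : 1 ≤ jb := by
    have := (hidx a haP).1
    omega
  have hjbnb : jb < nb := (hidx b hbP).2
  -- split the scan at jb
  have hsplit2 : PySem.List.pyRange 0 nb 1
      = PySem.List.pyRange 0 jb 1 ++ (jb :: PySem.List.pyRange (jb + 1) nb 1) := by
    rw [PySem.List.pyRange_one_append 0 jb nb (by omega) (by omega)]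
    congr 1
    exact PySem.List.pyRange_one_cons (by omega)
  obtain ⟨⟨hmidP, hmididx, hmidmax⟩, hmidwrap, hmidle⟩ := inv (jb - 1).toNat (by omega)
  have hjbcast : (1 + ((jb - 1).toNat : Int)) = jb := by omega
  rw [hjbcast] at hmidP hmididx hmidmax hmidwrap hmidle
  set mid := (PySem.List.pyRange 0 jb 1).foldl (pvScanStep bs.1 bs.2) (wrap, lo) with hmid
  have hmida : mid.2 = a := by
    have h1 : a ≤ mid.2 := hmidmax a haP (by omega)
    have h2 : mid.2 ≤ a := by
      by_contra hcon
      have hge : b ≤ mid.2 := by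
        rcases lt_or_ge mid.2 b with hx | hx
        · exact absurd ⟨by omega, hx⟩ (habadj mid.2 hmidP)
        · omega
      have h3 := idx_mono b mid.2 hge
      omega
    omega
  have hjbnat : ((jb.toNat : Nat) : Int) = jb := by have := (hidx b hbP).1; omega
  have hbmin_jb : PySem.List.pyGetD bs.1 jb none = some b := by
    have hbB : b ∈ P.filter (fun r => pvIdx lo w r = ((jb.toNat : Nat) : Int)) :=
      List.mem_filter.mpr ⟨hbP, by rw [hjbnat]; simp [hjbdef]⟩
    have hne : P.filter (fun r => pvIdx lo w r = ((jb.toNat : Nat) : Int)) ≠ [] := by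
      intro h; rw [h] at hbB; simp at hbB
    obtain ⟨mn, hmn, hmnmem, hmnmin⟩ := minO_spec _ hne
    have hmnb : mn = b := by
      have h1 : mn ≤ b := hmnmin b hbB
      have h2 : b ≤ mn := by
        have hmnP : mn ∈ P := List.mem_of_mem_filter hmnmem
        have hmnidx : pvIdx lo w mn = jb := by
          have := (List.mem_filter.mp hmnmem).2
          rw [← hjbnat]; simpa using this
        have hmna : a < mn := idx_lt a mn (by omega)
        rcases lt_or_ge mn b with hx | hx
        · exact absurd ⟨hmna, hx⟩ (habadj mn hmnP)
        · omega
      omega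
    rw [← hjbnat, hminchar jb.toNat, hmn, hmnb]
  have hfinsplit : fin = (PySem.List.pyRange (jb + 1) nb 1).foldl (pvScanStep bs.1 bs.2)
      (pvScanStep bs.1 bs.2 mid jb) := by
    rw [hfin, hsplit2, List.foldl_append, List.foldl_cons]
  have hstepval : (pvScanStep bs.1 bs.2 mid jb).1 ≥ pvGmax S := by
    rw [pvScanStep, hbmin_jb]
    dsimp only
    rw [hmida, ← hgab]
    split <;> omega
  have hfinge : pvGmax S ≤ fin.1 := by
    rw [hfinsplit]
    exact le_trans hstepval (scan_mono bs.1 bs.2 _ _)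
  omega



-- A's index loop over range(len(S)-1) computes pvGmax S
theorem scanA_eq (m : List Int) :
    (PySem.List.pyRange 0 ((m.length : Int) - 1) 1).foldl
        (fun mg i =>
          let gap := PySem.List.pyGetD m (i + 1) 0 - PySem.List.pyGetD m i 0
          if gap > mg then gap else mg) 0 = pvGmax m := by
  rcases m with _ | ⟨x, m'⟩
  · simp [PySem.List.pyRange_one_eq_nil, pvGmax]
  set m := x :: m' with hm
  set zs := m.zip m.tail with hzs
  have hlen : (zs.length : Int) = (m.length : Int) - 1 := by
    simp [hzs, List.length_zip, hm]
  rw [← hlen]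
  have hcongr : (PySem.List.pyRange 0 (zs.length : Int) 1).foldl
      (fun mg i =>
        let gap := PySem.List.pyGetD m (i + 1) 0 - PySem.List.pyGetD m i 0
        if gap > mg then gap else mg) 0
      = (PySem.List.pyRange 0 (zs.length : Int) 1).foldl
      (fun mg i =>
        (fun a p => if p.2 - p.1 > a then p.2 - p.1 else a) mg
          (PySem.List.pyGetD zs i ((0 : Int), (0 : Int)))) 0 := by
    apply PySem.List.foldl_congr_mem
    intro acc i hi
    rw [PySem.List.mem_pyRange_one] at hi
    have hi' : i.toNat < zs.length := by omega
    have h1 : i.toNat + 1 < m.length := by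
      have : zs.length = m.length - 1 := by simp [hzs, List.length_zip, hm]
      omega
    have e1 : PySem.List.pyGetD zs i ((0 : Int), (0 : Int)) = zs[i.toNat] :=
      PySem.List.pyGetD_eq_getElem zs ((0 : Int), (0 : Int)) hi.1 (by omega)
    have e2 : PySem.List.pyGetD m i 0 = m[i.toNat]'(by omega) :=
      PySem.List.pyGetD_eq_getElem m 0 hi.1 (by omega)
    have e3 : PySem.List.pyGetD m (i + 1) 0 = m[i.toNat + 1] := by
      rw [PySem.List.pyGetD_eq_getElem m 0 (by omega) (by omega)]
      congr 1; omega
    have e4 : zs[i.toNat]'(by omega) = (m[i.toNat]'(by omega), m[i.toNat + 1]'(by omega)) := by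
      rw [List.getElem_zip, List.getElem_tail]
    simp only [e1, e2, e3, e4]
  rw [hcongr, pvGmax]
  exact PySem.List.foldl_pyRange_zero_pyGetD' zs ((0 : Int), (0 : Int))
    (fun mg p => if p.2 - p.1 > mg then p.2 - p.1 else mg) 0


theorem pv_ab_eq (edo fifth_size num_apotomes : Int)
    (hna : 0 ≤ num_apotomes) : get_minimum_req_arrows edo fifth_size num_apotomes = get_minimum_req_arrows_alt edo fifth_size num_apotomes := by
  simp only [get_minimum_req_arrows, get_minimum_req_arrows_alt, PySem.List.dedup_eq_ofList]
  set L := (PySem.List.pyRange 0 (7 * (num_apotomes * 2 + 1)) 1).map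
      (fun x => PySem.Int.mod (x * fifth_size) edo) with hL
  set P := PySem.Set.ofList L with hP
  set S := PySem.List.sorted P (fun x => x) false with hS
  -- basic facts
  have hLne : L ≠ [] := by
    rw [hL]
    have : PySem.List.pyRange 0 (7 * (num_apotomes * 2 + 1)) 1 ≠ [] := by
      have h7 : (0 : Int) < 7 * (num_apotomes * 2 + 1) := by omega
      rw [PySem.List.pyRange_one_cons (by omega)]
      simp
    simpa using this
  have hPne : P ≠ [] := by
    intro h
    have := (PySem.Set.mem_ofList L (L.head hLne)).mpr (List.head_mem hLne)
    rw [← hP, h] at this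
    simp at this
  have hperm : S.Perm P := PySem.List.sorted_perm P _ false
  have hnodupP : P.Nodup := PySem.Set.nodup_ofList L
  have hnodupS : S.Nodup := hperm.nodup_iff.mpr hnodupP
  have hSle : S.Pairwise (fun a b => a ≤ b) := PySem.List.sorted_pairwise P _
  have hSlt : S.Pairwise (· < ·) := by
    have := List.Pairwise.and hSle hnodupS
    exact this.imp (fun h => lt_of_le_of_ne h.1 h.2)
  have hmem : ∀ x : Int, x ∈ P ↔ x ∈ S := fun x => (hperm.mem_iff).symm
  have hSne : S ≠ [] := by
    intro h
    rw [h] at hperm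
    exact hPne (hperm.symm.eq_nil)
  have hlenSP : S.length = P.length := hperm.length_eq
  -- min and max of the set
  rcases hmn : PySem.List.min? P (fun r => r) with _ | lo0
  · exact absurd ((PySem.List.min?_eq_none_iff P _).mp hmn) hPne
  rcases hmx : PySem.List.max? P (fun r => r) with _ | hi0
  · exact absurd ((PySem.List.max?_eq_none_iff P _).mp hmx) hPne
  have hminD : PySem.List.minD P (fun r => r) 0 = lo0 := by
    rw [PySem.List.minD, hmn]; rfl
  have hmaxD : PySem.List.maxD P (fun r => r) 0 = hi0 := by
    rw [PySem.List.maxD, hmx]; rfl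
  have hloP : lo0 ∈ P := PySem.List.min?_mem hmn
  have hlomin : ∀ x ∈ P, lo0 ≤ x := PySem.List.min?_id_le hmn
  have hhiP : hi0 ∈ P := PySem.List.max?_mem hmx
  have hhimax : ∀ x ∈ P, x ≤ hi0 := PySem.List.max?_id_le hmx
  rw [hminD, hmaxD]
  -- head and last of the sorted list are the min and the max
  have hheadle : ∀ x ∈ S, S.head hSne ≤ x := by
    intro x hx
    obtain ⟨t, ht, rfl⟩ := List.getElem_of_mem hx
    rw [List.head_eq_getElem]
    rcases Nat.eq_zero_or_pos t with h | h
    · subst h; exact le_refl _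
    · exact le_of_lt (sorted_getElem_lt S hSlt 0 t h ht)
  have hlastge : ∀ x ∈ S, x ≤ S.getLast hSne := by
    intro x hx
    obtain ⟨t, ht, rfl⟩ := List.getElem_of_mem hx
    rw [List.getLast_eq_getElem]
    rcases Nat.lt_or_ge t (S.length - 1) with h | h
    · exact le_of_lt (sorted_getElem_lt S hSlt t (S.length - 1) h (by omega))
    · have : t = S.length - 1 := by omega
      subst this; exact le_refl _
  have hhead : PySem.List.pyGetD S 0 0 = lo0 := by
    rw [PySem.List.pyGetD_zero]
    have hgd : S.getD 0 0 = S.head hSne := by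
      rcases S with _ | ⟨s, t⟩
      · exact absurd rfl hSne
      · rfl
    rw [hgd]
    have h1 := hheadle lo0 ((hmem lo0).mp hloP)
    have h2 := hlomin (S.head hSne) ((hmem _).mpr (List.head_mem hSne))
    omega
  have hlast : PySem.List.pyGetD S (-1) 0 = hi0 := by
    rw [PySem.List.pyGetD_neg_one S 0 hSne]
    have h1 := hlastge hi0 ((hmem hi0).mp hhiP)
    have h2 := hhimax (S.getLast hSne) ((hmem _).mpr (List.getLast_mem hSne))
    omega
  rw [scanA_eq S, hhead, hlast]
  by_cases hk1 : PySem.Set.len P = 1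
  · -- a single mapped step
    rw [if_pos hk1]
    have hlen1 : P.length = 1 := by
      rw [PySem.Set.len] at hk1; omega
    obtain ⟨r, hr⟩ := List.length_eq_one_iff.mp hlen1
    have hSr : S = [r] := by
      rw [hr] at hperm
      exact List.perm_singleton.mp hperm
    have hg0 : pvGmax S = 0 := by rw [hSr]; rfl
    have hlor : lo0 = r := by
      have := hloP; rw [hr] at this; simpa using this
    have hhir : hi0 = r := by
      have := hhiP; rw [hr] at this; simpa using this
    rw [hg0, hlor, hhir]
    have hlg : r + edo - r = edo := by omega
    rw [hlg]
    by_cases hpos : edo > 0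
    · rw [if_pos hpos, if_pos hpos]
    · rw [if_neg hpos, if_neg hpos]
      decide
  · -- at least two mapped steps
    rw [if_neg hk1]
    have hk2 : 2 ≤ S.length := by
      rw [PySem.Set.len] at hk1
      have : P.length ≠ 0 := fun h => hPne (List.length_eq_zero_iff.mp h)
      omega
    have hklen : PySem.Set.len P = (S.length : Int) := by
      rw [PySem.Set.len, hlenSP]
    have hlohi : lo0 < hi0 := by
      have h01 : S[0]'(by omega) < S[1]'(by omega) := sorted_getElem_lt S hSlt 0 1 (by omega) (by omega)
      have ha := hlomin (S[0]'(by omega)) ((hmem _).mpr (List.getElem_mem _))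
      have hb := hhimax (S[1]'(by omega)) ((hmem _).mpr (List.getElem_mem _))
      omega
    set k : Int := PySem.Set.len P with hkdef
    set w : Int := PySem.Int.floordiv (hi0 - lo0 + k - 2) (k - 1) with hwdef
    set nb : Int := PySem.Int.floordiv (hi0 - lo0) w + 1 with hnbdef
    have hkval : k = (S.length : Int) := hklen
    have hw : 0 < w := by
      rw [hwdef]
      have := (PySem.Int.le_floordiv_iff_mul_le
        (a := hi0 - lo0 + k - 2) (b := k - 1) (q := 1) (by omega)).mpr (by omega)
      omega
    have hnb1 : 1 ≤ nb := by
      rw [hnbdef]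
      have := (PySem.Int.le_floordiv_iff_mul_le
        (a := hi0 - lo0) (b := w) (q := 0) hw).mpr (by omega)
      omega
    have hidx : ∀ r ∈ P, 0 ≤ pvIdx lo0 w r ∧ pvIdx lo0 w r < nb := by
      intro r hr
      constructor
      · exact (PySem.Int.le_floordiv_iff_mul_le (q := 0) hw).mpr
          (by have := hlomin r hr; omega)
      · have hmono : PySem.Int.floordiv (r - lo0) w ≤ PySem.Int.floordiv (hi0 - lo0) w := by
          rw [PySem.Int.floordiv_eq_ediv_of_pos hw, PySem.Int.floordiv_eq_ediv_of_pos hw]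
          exact Int.ediv_le_ediv hw (by have := hhimax r hr; omega)
        rw [hnbdef]
        unfold pvIdx
        omega
    have hgaps_le : ∀ x ∈ pvGaps S, x ≤ pvGmax S := by
      intro x hx
      rw [pvGmax_eq_foldl_max]
      exact le_foldl_max_mem _ 0 x hx
    have hgapslen : (pvGaps S).length = S.length - 1 := by
      simp [pvGaps]
    have hsum : (pvGaps S).sum = hi0 - lo0 := by
      rw [pvGaps_sum S (S.head hSne) hSne rfl]
      have h1 := hheadle lo0 ((hmem lo0).mp hloP)
      have h2 := hlomin (S.head hSne) ((hmem _).mpr (List.head_mem hSne))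
      have h3 := hlastge hi0 ((hmem hi0).mp hhiP)
      have h4 := hhimax (S.getLast hSne) ((hmem _).mpr (List.getLast_mem hSne))
      omega
    have hpig : hi0 - lo0 ≤ ((S.length : Int) - 1) * pvGmax S := by
      have := List.sum_le_card_nsmul (pvGaps S) (pvGmax S) hgaps_le
      rw [hsum, hgapslen] at this
      have hcast : ((S.length - 1 : Nat) : Int) = (S.length : Int) - 1 := by omega
      calc hi0 - lo0 ≤ ((S.length - 1 : Nat) : Int) * pvGmax S := by
            simpa [nsmul_eq_mul] using this
        _ = ((S.length : Int) - 1) * pvGmax S := by rw [hcast]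
    have hgw : w ≤ pvGmax S := by
      by_contra hcon
      have h1 : pvGmax S + 1 ≤ w := by omega
      rw [hwdef] at h1
      have h2 := (PySem.Int.le_floordiv_iff_mul_le
        (a := hi0 - lo0 + k - 2) (b := k - 1) (q := pvGmax S + 1) (by omega)).mp h1
      rw [hkval] at h2
      nlinarith [hpig]
    rw [bucket_scan_main P S edo lo0 hi0 w nb hSlt hmem hk2 hw hnb1 hloP hlomin hhiP hhimax hidx hgw]
    congr 1
    rcases max_cases (pvGmax S) (lo0 + edo - hi0) with ⟨he, hc⟩ | ⟨he, hc⟩ <;> rw [he] <;>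
      split_ifs <;> omega



-- ===== VERDICT (by name: the statement is the Claim_ definition above) =====
theorem get_minimum_req_arrows_spec : Claim_equal_get_minimum_req_arrows := by
  intro edo fifth_size num_apotomes _ hpre
  show get_minimum_req_arrows edo fifth_size num_apotomes
      = get_minimum_req_arrows_alt edo fifth_size num_apotomes
  exact pv_ab_eq edo fifth_size num_apotomes hpre.2
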